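-- pv_equiv track=rewrite | github.com/yuanlang/algorithm-practise | python/minimum_leaves.py | minimumOperations_no_mem
-- ===== SOURCE A (Python) =====
-- def minimumOperations_no_mem(leaves: str) -> int:
--     str1_char_not = 'y'
--     str2_char_not = 'r'
--     str3_char_not = 'y'
--     length = len(leaves)
--     # pos1, the seprate between str1 and str2
--     # pos2, the seprate between str2 and str3
--     # length of each string need to bigger than 1
--     ret = 10 ** 5
--     pos1_start, pos1_end = 1, length - 2
--     _pos2_start, pos2_end = 2, length - 1
--     for i in range(pos1_start, pos1_end):
--         for j in range(i+1, pos2_end):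
--             str1 = leaves[0:i]
--             str2 = leaves[i:j]
--             str3 = leaves[j:length]
--             ret = min(ret, str1.count(str1_char_not) +
--                       str2.count(str2_char_not) + str3.count(str3_char_not))
--     return ret
-- ===== SOURCE B (Python) =====
-- def minimumOperations_no_mem(leaves: str) -> int:
--     # One pass with prefix counts: cost of a split (i, j) is
--     # (Y_i - R_i) + (R_j - Y_j) + Ytot, so for each j keep the best (Y_i - R_i).
--     n = len(leaves)
--     ret = 10 ** 5
--     if n < 4:
--         return ret
--     ytot = leaves.count('y')
--     y = 1 if leaves[0] == 'y' else 0   # 'y' count in leaves[:k]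
--     r = 1 if leaves[0] == 'r' else 0   # 'r' count in leaves[:k]
--     best = y - r                       # min over i in [1, j-1] of Y_i - R_i
--     for j in range(2, n - 1):
--         c = leaves[j - 1]
--         if c == 'y':
--             y += 1
--         if c == 'r':
--             r += 1
--         ret = min(ret, best + (r - y) + ytot)
--         best = min(best, y - r)
--     return ret
-- ===== Notes on version B (the rewrite author's own statement) =====
-- stated objective: faster
-- what changed: Replaced the double loop over all split points (with slice copies and full substring counts inside) by a single left-to-right pass that maintains prefix counts of the two leaf colours and a running minimum of the left-part cost, since a split's cost decomposes as (Y_i - R_i) + (R_j - Y_j) + Ytot.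
import Mathlib
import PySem

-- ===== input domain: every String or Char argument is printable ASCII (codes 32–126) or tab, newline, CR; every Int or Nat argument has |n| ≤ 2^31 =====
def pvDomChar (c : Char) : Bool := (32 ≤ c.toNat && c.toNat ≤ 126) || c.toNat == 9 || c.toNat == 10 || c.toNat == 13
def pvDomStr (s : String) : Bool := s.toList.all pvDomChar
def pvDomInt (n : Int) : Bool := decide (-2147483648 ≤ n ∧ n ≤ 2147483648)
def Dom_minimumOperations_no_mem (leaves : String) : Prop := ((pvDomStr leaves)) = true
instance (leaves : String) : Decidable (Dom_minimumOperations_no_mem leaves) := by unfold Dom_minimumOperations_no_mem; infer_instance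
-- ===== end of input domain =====

-- B replaces A's nested slice-and-count scan over all split pairs by a single left-to-right pass over prefix counts with a running minimum.


-- ===== PORT A =====
def minimumOperations_no_mem (leaves : String) : Int :=
  let length : Int := PySem.Str.len leaves
  let ret : Int := 10 ^ 5
  let pos1_start : Int := 1
  let pos1_end : Int := length - 2
  let pos2_end : Int := length - 1
  (PySem.List.pyRange pos1_start pos1_end 1).foldl (fun ret i =>
    (PySem.List.pyRange (i + 1) pos2_end 1).foldl (fun ret j =>
      let str1 := PySem.Str.slice leaves (some 0) (some i)
      let str2 := PySem.Str.slice leaves (some i) (some j)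
      let str3 := PySem.Str.slice leaves (some j) (some length)
      min ret ((PySem.Str.count str1 "y" : Int) +
               (PySem.Str.count str2 "r" : Int) +
               (PySem.Str.count str3 "y" : Int))) ret) ret

-- ===== PORT B =====
def minimumOperations_no_mem_alt (leaves : String) : Int :=
  let n : Int := PySem.Str.len leaves
  let ret : Int := 10 ^ 5
  if n < 4 then ret
  else
    let ytot : Int := PySem.Str.count leaves "y"
    let y : Int := if PySem.Str.pyGet? leaves 0 = some 'y' then 1 else 0
    let r : Int := if PySem.Str.pyGet? leaves 0 = some 'r' then 1 else 0
    let best : Int := y - r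
    let final := (PySem.List.pyRange 2 (n - 1) 1).foldl
      (fun (st : Int × Int × Int × Int) j =>
        let c := PySem.Str.pyGet? leaves (j - 1)
        let y := if c = some 'y' then st.2.2.1 + 1 else st.2.2.1
        let r := if c = some 'r' then st.2.2.2 + 1 else st.2.2.2
        let ret := min st.1 (st.2.1 + (r - y) + ytot)
        let best := min st.2.1 (y - r)
        (ret, best, y, r)) (ret, best, y, r)
    final.1

-- ===== PRECONDITION & SPEC =====
def Spec_minimumOperations_no_mem (leaves : String) (out : Int) : Prop := out = minimumOperations_no_mem_alt leaves
instance (leaves : String) (out : Int) : Decidable (Spec_minimumOperations_no_mem leaves out) := by unfold Spec_minimumOperations_no_mem; infer_instance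

-- ===== CLAIM (what is proved, stated in full; the proofs are below) =====
def Claim_equal_minimumOperations_no_mem : Prop := ∀ (leaves : String), Dom_minimumOperations_no_mem leaves → Spec_minimumOperations_no_mem leaves (minimumOperations_no_mem leaves)

-- ===== LEMMAS AND PROOFS =====

-- Python's s.count(c) for a single character c is the character count.
theorem pvCount_go (c : Char) (l : List Char) (fuel acc : Nat) (h : l.length ≤ fuel) :
    PySem.Chars.count.go [c] fuel l acc = acc + l.count c := by
  induction l generalizing fuel acc with
  | nil => cases fuel <;> simp [PySem.Chars.count.go]
  | cons x t ih =>
    cases fuel with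
    | zero => simp at h
    | succ fuel =>
      simp only [PySem.Chars.count.go]
      by_cases hx : x = c
      · subst hx
        simp only [List.isPrefixOf, BEq.rfl, Bool.true_and, if_true]
        show PySem.Chars.count.go [x] fuel t (acc + 1) = _
        rw [ih fuel (acc+1) (by simpa using h)]
        simp [List.count_cons]
        omega
      · have : ([c].isPrefixOf (x :: t)) = false := by
          simp [List.isPrefixOf]; exact fun hcontra => (hx hcontra.symm).elim
        rw [this]
        simp only [if_false, Bool.false_eq_true]
        rw [ih fuel acc (by simpa using h)]
        simp [hx]

theorem pvCount_singleton (cs : List Char) (c : Char) :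
    PySem.Chars.count cs [c] = cs.count c := by
  rw [PySem.Chars.count]
  simp only [List.isEmpty_cons, if_false, Bool.false_eq_true]
  rw [pvCount_go c cs cs.length 0 le_rfl]; omega

-- prefix counts (as integers) and the cost pieces of a split (i, j)
def pvCY (l : List Char) (k : Nat) : Int := ((l.take k).count 'y' : Int)
def pvCR (l : List Char) (k : Nat) : Int := ((l.take k).count 'r' : Int)
def pvP (l : List Char) (i : Int) : Int := pvCY l i.toNat - pvCR l i.toNat
def pvQ (l : List Char) (j : Int) : Int := pvCR l j.toNat - pvCY l j.toNat + (l.count 'y' : Int)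

-- A's value written as a double fold over the split cost expressed with prefix counts
def pvAform (l : List Char) (t : Int) : Int :=
  (PySem.List.pyRange 1 (t - 1) 1).foldl (fun ret i =>
    (PySem.List.pyRange (i + 1) t 1).foldl (fun r j => min r (pvP l i + pvQ l j)) ret) (10 ^ 5)

-- running minimum of pvP over [1, t-1]
def pvMinP (l : List Char) (t : Int) : Int :=
  (PySem.List.pyRange 2 t 1).foldl (fun b i => min b (pvP l i)) (pvP l 1)

-- generic fold-of-min facts
theorem pvFoldMin_init {α : Type} (L : List α) (f : α → Int) (a s : Int) :
    L.foldl (fun b i => min b (f i)) (min a s) = min (L.foldl (fun b i => min b (f i)) a) s := by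
  induction L generalizing a with
  | nil => rfl
  | cons x L ih => simp only [List.foldl_cons]; rw [min_right_comm, ih]

theorem pvFoldMin_add {α : Type} (L : List α) (f : α → Int) (c a : Int) :
    L.foldl (fun b i => min b (f i + c)) (a + c) = L.foldl (fun b i => min b (f i)) a + c := by
  induction L generalizing a with
  | nil => rfl
  | cons x L ih => simp only [List.foldl_cons]; rw [min_add_add_right, ih]

theorem pvFold_hF {α : Type} (L : List α) (F : Int → α → Int)
    (hF : ∀ i r s, F (min r s) i = min (F r i) s) (a s : Int) :
    L.foldl F (min a s) = min (L.foldl F a) s := by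
  induction L generalizing a with
  | nil => rfl
  | cons x L ih => simp only [List.foldl_cons]; rw [hF, ih]

theorem pvFold_pullout {α : Type} (L : List α) (F : Int → α → Int) (c : α → Int)
    (hF : ∀ i r s, F (min r s) i = min (F r i) s) (a : Int) :
    L.foldl (fun r i => min (F r i) (c i)) a
      = L.foldl (fun b i => min b (c i)) (L.foldl F a) := by
  induction L generalizing a with
  | nil => rfl
  | cons x L ih =>
    simp only [List.foldl_cons]
    rw [ih, pvFold_hF L F hF, pvFoldMin_init]

-- the loop-order interchange: extending all inner ranges by one j = t
theorem pvAform_step (l : List Char) (t : Int) (ht : 2 ≤ t) :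
    pvAform l (t + 1) = min (pvAform l t) (pvMinP l t + pvQ l t) := by
  unfold pvAform pvMinP
  have h1 : t + 1 - 1 = t := by ring
  rw [h1]
  -- split the outer range at t-1
  rw [PySem.List.pyRange_one_append 1 (t - 1) t (by omega) (by omega), List.foldl_append]
  have h2 : PySem.List.pyRange (t - 1) t 1 = [t - 1] := by
    have := PySem.List.pyRange_one_singleton (t - 1)
    rw [show t - 1 + 1 = t by ring] at this
    exact this
  rw [h2]
  simp only [List.foldl_cons, List.foldl_nil]
  -- inner range of the last element i = t - 1 is [t]
  have h3 : PySem.List.pyRange (t - 1 + 1) (t + 1) 1 = [t] := by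
    rw [show t - 1 + 1 = t by ring]; exact PySem.List.pyRange_one_singleton t
  rw [h3]
  simp only [List.foldl_cons, List.foldl_nil]
  -- for i in the remaining range, split the inner range at t
  rw [PySem.List.foldl_congr_mem (PySem.List.pyRange 1 (t - 1) 1)
      (fun ret i => (PySem.List.pyRange (i + 1) (t + 1) 1).foldl (fun r j => min r (pvP l i + pvQ l j)) ret)
      (fun ret i => min ((PySem.List.pyRange (i + 1) t 1).foldl (fun r j => min r (pvP l i + pvQ l j)) ret) (pvP l i + pvQ l t))
      (10 ^ 5)
      (by
        intro acc x hx
        rw [PySem.List.mem_pyRange_one] at hx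
        beta_reduce
        rw [PySem.List.pyRange_one_append (x + 1) t (t + 1) (by omega) (by omega), List.foldl_append,
            PySem.List.pyRange_one_singleton t]
        simp)]
  -- pull the new terms out of the outer fold
  rw [pvFold_pullout (PySem.List.pyRange 1 (t - 1) 1)
      (fun ret i => (PySem.List.pyRange (i + 1) t 1).foldl (fun r j => min r (pvP l i + pvQ l j)) ret)
      (fun i => pvP l i + pvQ l t)
      (fun i r s => pvFoldMin_init _ _ r s) (10 ^ 5)]
  -- fold over [1, t-1] of mins plus the extra i = t-1 term = fold over [1, t]
  have h4 : PySem.List.pyRange 1 t 1 = PySem.List.pyRange 1 (t - 1) 1 ++ [t - 1] := by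
    rw [PySem.List.pyRange_one_append 1 (t - 1) t (by omega) (by omega), h2]
  set A := (PySem.List.pyRange 1 (t - 1) 1).foldl (fun ret i =>
    (PySem.List.pyRange (i + 1) t 1).foldl (fun r j => min r (pvP l i + pvQ l j)) ret) (10 ^ 5) with hA
  have h5 : ((PySem.List.pyRange 1 (t - 1) 1).foldl (fun b i => min b (pvP l i + pvQ l t)) A)
        ⊓ (pvP l (t - 1) + pvQ l t)
      = (PySem.List.pyRange 1 t 1).foldl (fun b i => min b (pvP l i + pvQ l t)) A := by
    rw [h4, List.foldl_append]; simp
  rw [show (min ((PySem.List.pyRange 1 (t-1) 1).foldl (fun b i => min b (pvP l i + pvQ l t)) A) (pvP l (t-1) + pvQ l t)) = _ from h5]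
  -- peel off i = 1 and use distributivity of + over the running min
  rw [PySem.List.pyRange_one_cons (show (1:Int) < t by omega)]
  simp only [List.foldl_cons]
  rw [show (1:Int) + 1 = 2 by ring]
  rw [min_comm A (pvP l 1 + pvQ l t), pvFoldMin_init, pvFoldMin_add, min_comm]

-- count of a prefix extended by one character
theorem pvCount_take_succ (l : List Char) (k : Nat) (c : Char) (hk : k < l.length) :
    ((l.take (k + 1)).count c : Int)
      = ((l.take k).count c : Int) + (if l[k]? = some c then 1 else 0) := by
  by_cases h : l[k] = c
  · rw [List.take_add_one, List.getElem?_eq_getElem hk, List.count_append]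
    simp [h]
  · push_cast
    rw [List.take_add_one, List.getElem?_eq_getElem hk, List.count_append]
    have hb : (l[k] == c) = false := by simpa using h
    simp [List.count_cons, hb]
    exact h

-- B's loop invariant: after processing j = 2 .. k+1 the state is
-- (A's answer for splits with j ≤ k+1, running min of pvP, prefix counts up to k+1)
theorem pvB_inv (l : List Char) (k : Nat) (hk : k + 3 ≤ l.length) :
    (PySem.List.pyRange 2 ((k : Int) + 2) 1).foldl
      (fun (st : Int × Int × Int × Int) j =>
        let c := l[(j - 1).toNat]?
        let y := if c = some 'y' then st.2.2.1 + 1 else st.2.2.1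
        let r := if c = some 'r' then st.2.2.2 + 1 else st.2.2.2
        let ret := min st.1 (st.2.1 + (r - y) + (l.count 'y' : Int))
        let best := min st.2.1 (y - r)
        (ret, best, y, r)) (10 ^ 5, pvP l 1, pvCY l 1, pvCR l 1)
    = (pvAform l ((k : Int) + 2), pvMinP l ((k : Int) + 2), pvCY l (k + 1), pvCR l (k + 1)) := by
  induction k with
  | zero =>
    rw [PySem.List.pyRange_one_eq_nil (by norm_num)]
    simp [pvAform, pvMinP, pvP, PySem.List.pyRange_one_eq_nil]
  | succ k ih =>
    have hk' : k + 3 ≤ l.length := by omega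
    have hsplit : PySem.List.pyRange 2 ((k + 1 : Nat) + 2 : Int) 1
        = PySem.List.pyRange 2 ((k : Int) + 2) 1 ++ [(k : Int) + 2] := by
      push_cast
      rw [show (k : Int) + 1 + 2 = ((k : Int) + 2) + 1 by ring]
      exact PySem.List.pyRange_one_succ_right (show (2:Int) ≤ (k : Int) + 2 by omega)
    rw [hsplit, List.foldl_append, ih hk']
    simp only [List.foldl_cons, List.foldl_nil]
    have hidx : (((k : Int) + 2) - 1).toNat = k + 1 := by omega
    have hlt : k + 1 < l.length := by omega
    have hy : (if l[k+1]? = some 'y' then (((l.take (k+1)).count 'y' : Int)) + 1 else ((l.take (k+1)).count 'y' : Int)) = pvCY l (k + 1 + 1) := by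
      rw [pvCY, pvCount_take_succ l (k+1) 'y' hlt]
      split_ifs with h <;> simp
    have hr : (if l[k+1]? = some 'r' then (((l.take (k+1)).count 'r' : Int)) + 1 else ((l.take (k+1)).count 'r' : Int)) = pvCR l (k + 1 + 1) := by
      rw [pvCR, pvCount_take_succ l (k+1) 'r' hlt]
      split_ifs with h <;> simp
    have htn : ((k : Int) + 2).toNat = k + 2 := by omega
    have hbest : min (pvMinP l ((k : Int) + 2)) (pvCY l (k+1+1) - pvCR l (k+1+1))
        = pvMinP l ((k + 1 : Nat) + 2 : Int) := by
      rw [pvMinP, pvMinP]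
      push_cast
      rw [show (k : Int) + 1 + 2 = ((k : Int) + 2) + 1 by ring,
          PySem.List.pyRange_one_succ_right (show (2:Int) ≤ (k : Int) + 2 by omega), List.foldl_append]
      simp only [List.foldl_cons, List.foldl_nil]
      rw [show pvP l ((k:Int)+2) = pvCY l (k+1+1) - pvCR l (k+1+1) from by rw [pvP, htn]]
    have hret : min (pvAform l ((k : Int) + 2))
          (pvMinP l ((k : Int) + 2) + (pvCR l (k+1+1) - pvCY l (k+1+1)) + (l.count 'y' : Int))
        = pvAform l ((k + 1 : Nat) + 2 : Int) := by
      push_cast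
      rw [show (k : Int) + 1 + 2 = ((k : Int) + 2) + 1 by ring,
          pvAform_step l ((k : Int) + 2) (by omega), pvQ, htn]
      ring_nf
    simp only [hidx, pvCY, pvCR]
    rw [show pvCY l (k+1) = ((l.take (k+1)).count 'y' : Int) from rfl] at *
    rw [hy, hr]
    simp only [Prod.mk.injEq]
    refine ⟨?_, ?_, rfl, rfl⟩
    · rw [← hret]
    · rw [← hbest]

-- slice-count bridges
theorem pvCount_take_sub (l : List Char) (c : Char) (i' j' : Nat) (h1 : i' ≤ j') :
    (((l.drop i').take (j' - i')).count c : Int)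
      = ((l.take j').count c : Int) - ((l.take i').count c : Int) := by
  have h : l.take j' = l.take i' ++ (l.drop i').take (j' - i') := by
    rw [← List.take_add, Nat.add_sub_cancel' h1]
  have := congrArg (List.count c) h
  rw [List.count_append] at this
  omega

theorem pvCount_drop (l : List Char) (c : Char) (j' : Nat) :
    (((l.drop j')).count c : Int) = (l.count c : Int) - ((l.take j')).count c := by
  have := congrArg (List.count c) (List.take_append_drop j' l)
  rw [List.count_append] at this
  omega

theorem pvStrCount_y (s : String) : (PySem.Str.count s "y" : Int) = (s.toList.count 'y' : Int) := by
  rw [PySem.Str.count, show ("y" : String).toList = ['y'] from rfl, pvCount_singleton]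

theorem pvStrCount_r (s : String) : (PySem.Str.count s "r" : Int) = (s.toList.count 'r' : Int) := by
  rw [PySem.Str.count, show ("r" : String).toList = ['r'] from rfl, pvCount_singleton]

-- A computes pvAform at t = len - 1
theorem pvA_eq (leaves : String) :
    minimumOperations_no_mem leaves = pvAform leaves.toList ((leaves.toList.length : Int) - 1) := by
  unfold minimumOperations_no_mem pvAform
  simp only []
  have hlen : PySem.Str.len leaves = (leaves.toList.length : Int) := by simp [pysem]
  rw [hlen, show (leaves.toList.length : Int) - 1 - 1 = (leaves.toList.length : Int) - 2 by ring]
  set l := leaves.toList with hl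
  set N : Int := (l.length : Int) with hN
  apply PySem.List.foldl_congr_mem
  intro acc i hi
  rw [PySem.List.mem_pyRange_one] at hi
  beta_reduce
  apply PySem.List.foldl_congr_mem
  intro acc2 j hj
  rw [PySem.List.mem_pyRange_one] at hj
  beta_reduce
  congr 1
  have h0i : (0:Int) ≤ i := by omega
  have h0j : (0:Int) ≤ j := by omega
  have hij : i.toNat ≤ j.toNat := by omega
  have hjN : j.toNat ≤ l.length := by omega
  have hs1 : (PySem.Str.slice leaves (some 0) (some i)).toList = l.take i.toNat := by
    simp [pysem]
    rw [PySem.List.slice_to _ h0i]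
  have hs2 : (PySem.Str.slice leaves (some i) (some j)).toList
      = (l.drop i.toNat).take (j.toNat - i.toNat) := by
    simp [pysem]
    rw [PySem.List.slice_toNat _ h0i h0j]
  have hs3 : (PySem.Str.slice leaves (some j) (some N)).toList
      = (l.drop j.toNat).take (N.toNat - j.toNat) := by
    simp [pysem]
    rw [PySem.List.slice_toNat _ h0j (by omega)]
  have ht3 : (l.drop j.toNat).take (N.toNat - j.toNat) = l.drop j.toNat := by
    apply List.take_of_length_le
    simp
    omega
  rw [pvStrCount_y, pvStrCount_y, pvStrCount_r, hs1, hs2, hs3, ht3,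
      pvCount_take_sub l 'r' i.toNat j.toNat hij, pvCount_drop l 'y' j.toNat]
  simp only [pvP, pvQ, pvCY, pvCR]
  ring

-- B computes pvAform at t = len - 1
theorem pvB_eq (leaves : String) :
    minimumOperations_no_mem_alt leaves = pvAform leaves.toList ((leaves.toList.length : Int) - 1) := by
  unfold minimumOperations_no_mem_alt
  simp only []
  have hlen : PySem.Str.len leaves = (leaves.toList.length : Int) := by simp [pysem]
  rw [hlen]
  set l := leaves.toList with hl
  by_cases h4 : (l.length : Int) < 4
  · rw [if_pos h4]
    rw [pvAform, PySem.List.pyRange_one_eq_nil (by omega)]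
    rfl
  · rw [if_neg h4]
    have hN4 : 4 ≤ l.length := by omega
    have hy0 : (if PySem.Str.pyGet? leaves 0 = some 'y' then (1:Int) else 0) = pvCY l 1 := by
      have : PySem.Str.pyGet? leaves 0 = l[(0:Nat)]? := by simp [pysem, ← hl]
      rw [this, pvCY, show l.take 1 = l.take (0+1) from rfl,
          pvCount_take_succ l 0 'y' (by omega)]
      simp
    have hr0 : (if PySem.Str.pyGet? leaves 0 = some 'r' then (1:Int) else 0) = pvCR l 1 := by
      have : PySem.Str.pyGet? leaves 0 = l[(0:Nat)]? := by simp [pysem, ← hl]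
      rw [this, pvCR, show l.take 1 = l.take (0+1) from rfl,
          pvCount_take_succ l 0 'r' (by omega)]
      simp
    have hstep : ∀ (st : Int × Int × Int × Int), ∀ j ∈ PySem.List.pyRange 2 ((l.length : Int) - 1) 1,
        (fun (st : Int × Int × Int × Int) j =>
          let c := PySem.Str.pyGet? leaves (j - 1)
          let y := if c = some 'y' then st.2.2.1 + 1 else st.2.2.1
          let r := if c = some 'r' then st.2.2.2 + 1 else st.2.2.2
          let ret := min st.1 (st.2.1 + (r - y) + (PySem.Str.count leaves "y" : Int))
          let best := min st.2.1 (y - r)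
          (ret, best, y, r)) st j
        = (fun (st : Int × Int × Int × Int) j =>
          let c := l[(j - 1).toNat]?
          let y := if c = some 'y' then st.2.2.1 + 1 else st.2.2.1
          let r := if c = some 'r' then st.2.2.2 + 1 else st.2.2.2
          let ret := min st.1 (st.2.1 + (r - y) + (l.count 'y' : Int))
          let best := min st.2.1 (y - r)
          (ret, best, y, r)) st j := by
      intro st j hj
      rw [PySem.List.mem_pyRange_one] at hj
      have hc : PySem.Str.pyGet? leaves (j - 1) = l[(j - 1).toNat]? := by
        simp only [pysem, PySem.List.pyGet?, PySem.List.pyIdx?, ← hl]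
        rw [if_pos (by omega : (0:Int) ≤ j - 1)]
        rw [if_pos (by omega : j - 1 < (l.length : Int))]
        simp
      have hyt : (PySem.Str.count leaves "y" : Int) = (l.count 'y' : Int) := pvStrCount_y leaves
      beta_reduce
      rw [hc, hyt]
    rw [PySem.List.foldl_congr_mem _ _ _ _ hstep, hy0, hr0,
        show (10:Int) ^ 5 = 10 ^ 5 from rfl]
    have hbp : pvCY l 1 - pvCR l 1 = pvP l 1 := by rw [pvP]; rfl
    rw [hbp]
    have hk := pvB_inv l (l.length - 3) (by omega)
    have hcast : ((l.length - 3 : Nat) : Int) + 2 = (l.length : Int) - 1 := by omega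
    rw [hcast] at hk
    rw [hk]

-- ===== VERDICT (by name: the statement is the Claim_ definition above) =====
theorem minimumOperations_no_mem_spec : Claim_equal_minimumOperations_no_mem := by
  intro leaves _
  unfold Spec_minimumOperations_no_mem
  rw [pvA_eq, pvB_eq]
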